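-- pv_equiv track=rewrite | github.com/LibenHailu/interview-prep | A2SV - G3 #1 (Div. 3)/B. ICPC Balloons.py | solution
-- ===== SOURCE A (Python) =====
-- def  solution(solved):
--     # iterate through solved problems
--     # set res to  0
--     # create hashSet
--     # if c not in hasset add 2 to res and addit to hashset
--     # if it is in hashset add 1
--     res = 0
--     hashSet = set()
--     for c in solved:
--         if c not in hashSet:
--             res += 2
--             hashSet.add(c)
--         else:
--             res += 1
--     return res
-- ===== SOURCE B (Python) =====
-- def solution(solved):
--     # Sort a copy; each repeated value then sits next to an earlier equal one,
--     # so every adjacent equal pair of the sorted list marks one repeat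
--     # (worth 1 balloon instead of 2): answer = 2*n - (adjacent equal pairs).
--     srt = sorted(solved)
--     return 2 * len(srt) - sum(1 for a, b in zip(srt, srt[1:]) if a == b)
-- ===== Notes on version B (the rewrite author's own statement) =====
-- stated objective: alternative
-- what changed: Replaces the hash-set membership loop by sort-then-scan: sort a copy, count adjacent equal pairs (one per repeat), and return 2*n minus that count; no set and no per-element membership test.
import Mathlib
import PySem

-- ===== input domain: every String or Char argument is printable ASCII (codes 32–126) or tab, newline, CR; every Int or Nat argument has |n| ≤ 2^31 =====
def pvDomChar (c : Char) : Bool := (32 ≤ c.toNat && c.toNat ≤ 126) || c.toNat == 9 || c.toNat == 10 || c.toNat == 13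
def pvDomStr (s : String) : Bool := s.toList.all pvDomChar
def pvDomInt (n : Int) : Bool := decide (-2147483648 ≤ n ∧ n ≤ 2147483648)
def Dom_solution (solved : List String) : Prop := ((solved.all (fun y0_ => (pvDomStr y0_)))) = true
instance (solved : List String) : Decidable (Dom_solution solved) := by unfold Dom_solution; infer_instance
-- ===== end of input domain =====

-- B replaces A's hash-set membership loop by sort-then-scan (2*n minus adjacent equal pairs
-- of the sorted copy); same cost class in practice, genuinely different algorithm.

-- ===== PORT A =====
def solutionLoop (solved : List String) (res : Int) (hashSet : PySem.Set String) : Int :=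
  match solved with
  | [] => res
  | c :: rest =>
    if ¬ PySem.Set.contains hashSet c then
      solutionLoop rest (res + 2) (PySem.Set.add hashSet c)
    else
      solutionLoop rest (res + 1) hashSet

def solution (solved : List String) : Int :=
  solutionLoop solved 0 PySem.Set.empty

-- ===== PORT B =====
def solution_alt (solved : List String) : Int :=
  let srt := PySem.List.sorted solved (fun x => x) false
  2 * (srt.length : Int) - ((srt.zip srt.tail).countP (fun p => p.1 == p.2) : Int)

-- ===== PRECONDITION & SPEC =====
def Spec_solution (solved : List String) (out : Int) : Prop := out = solution_alt solved
instance (solved : List String) (out : Int) : Decidable (Spec_solution solved out) := by unfold Spec_solution; infer_instance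

-- ===== CLAIM (what is proved, stated in full; the proofs are below) =====
def Claim_equal_solution : Prop := ∀ (solved : List String), Dom_solution solved → Spec_solution solved (solution solved)

-- ===== LEMMAS AND PROOFS =====

-- A's loop returns res + |rest| + (number of elements of rest not already in hashSet)
theorem solutionLoop_eq (solved : List String) : ∀ (res : Int) (s : PySem.Set String),
    solutionLoop solved res s =
      res + (solved.length : Int) + ((PySem.Set.update s solved).length - s.length : Int) := by
  induction solved with
  | nil => intro res s; simp [solutionLoop, PySem.Set.update]
  | cons c rest ih =>
    intro res s
    by_cases hmem : c ∈ s
    · have hc : PySem.Set.contains s c = true := (PySem.Set.contains_iff s c).mpr hmem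
      have hadd : PySem.Set.add s c = s := by simp [PySem.Set.add, hmem]
      have hupd : PySem.Set.update s (c :: rest) = PySem.Set.update s rest := by
        simp [PySem.Set.update, hadd]
      rw [solutionLoop, if_neg (fun hn => hn hc), ih, hupd]
      simp only [List.length_cons, PySem.Set.update]
      push_cast
      ring
    · have hc : ¬ PySem.Set.contains s c = true :=
        fun t => hmem ((PySem.Set.contains_iff s c).mp t)
      have hadd : PySem.Set.add s c = s ++ [c] := by simp [PySem.Set.add, hmem]
      have hupd : PySem.Set.update s (c :: rest) = PySem.Set.update (s ++ [c]) rest := by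
        simp [PySem.Set.update, hadd]
      rw [solutionLoop, if_pos hc, hadd, ih, hupd]
      simp only [List.length_cons, List.length_append,
        List.length_nil, PySem.Set.update]
      push_cast
      ring

-- On a (≤)-sorted list, adjacent equal pairs + distinct values = length.
theorem adj_add_card_of_pairwise (ys : List String) (h : ys.Pairwise (· ≤ ·)) :
    (ys.zip ys.tail).countP (fun p => p.1 == p.2) + ys.toFinset.card = ys.length := by
  induction ys with
  | nil => simp
  | cons a t ih =>
    match t, h with
    | [], _ => simp
    | b :: t', h =>
      have hab : a ≤ b := (List.pairwise_cons.mp h).1 b (by simp)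
      have ht : (b :: t').Pairwise (· ≤ ·) := (List.pairwise_cons.mp h).2
      have ihc := ih ht
      by_cases heq : a = b
      · subst heq
        simp only [List.tail_cons, List.zip_cons_cons, List.countP_cons, List.toFinset_cons,
          Finset.insert_idem, beq_self_eq_true, if_true, List.length_cons] at ihc ⊢
        omega
      · have hnot : a ∉ (b :: t') := by
          intro hmem
          rcases List.mem_cons.mp hmem with h1 | h2
          · exact heq h1
          · exact heq (le_antisymm hab ((List.pairwise_cons.mp ht).1 a h2))
        have hcard : (a :: b :: t').toFinset.card = (b :: t').toFinset.card + 1 := by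
          rw [List.toFinset_cons (a := a), Finset.card_insert_of_notMem (by simpa using hnot)]
        have hne : (a == b) = false := by simpa using heq
        simp only [List.tail_cons, List.zip_cons_cons, List.countP_cons, hne,
          List.length_cons] at ihc ⊢
        simp only [Bool.false_eq_true, if_false] at ⊢
        omega

-- a Nodup list's length is its toFinset card
theorem len_ofList_eq_card (l : List String) :
    (PySem.Set.ofList l).length = l.toFinset.card := by
  rw [← List.toFinset_card_of_nodup (PySem.Set.nodup_ofList l)]
  congr 1
  ext x
  simp [PySem.Set.mem_ofList]

-- ===== VERDICT (by name: the statement is the Claim_ definition above) =====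
theorem solution_spec : Claim_equal_solution := by
  intro solved _
  unfold Spec_solution solution solution_alt
  rw [solutionLoop_eq]
  have hupd : PySem.Set.update PySem.Set.empty solved = PySem.Set.ofList solved := by
    simp [PySem.Set.update, PySem.Set.ofList, PySem.Set.empty]
  rw [hupd]
  set srt := PySem.List.sorted solved (fun x => x) false with hsrt
  have hperm : srt.Perm solved := PySem.List.sorted_perm solved (fun x => x) false
  have hpw : srt.Pairwise (· ≤ ·) := by
    simpa using PySem.List.sorted_pairwise solved (fun x => x)
  have hadj := adj_add_card_of_pairwise srt hpw
  have hlen : srt.length = solved.length := hperm.length_eq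
  have hfin : srt.toFinset = solved.toFinset := by
    ext x; simp [hperm.mem_iff]
  rw [len_ofList_eq_card, ← hfin, ← hlen]
  simp only [PySem.Set.empty, List.length_nil]
  omega
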